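-- pv_equiv track=rewrite | github.com/Cesar514/cosimo-idai-test | robotics_maze/scripts/regenerate_tables_from_snapshot.py | _shared_success_indices
-- ===== SOURCE A (Python) =====
-- def _shared_success_indices(grouped: dict[str, list[dict]]) -> set[int]:
--     """Maze indices solved successfully by ALL planners."""
--     per_maze: dict[int, set[str]] = {}
--     success_per_maze: dict[int, set[str]] = {}
--     for planner, rows in grouped.items():
--         for row in rows:
--             idx = row["maze_index"]
--             per_maze.setdefault(idx, set()).add(planner)
--             if row["success"]:
--                 success_per_maze.setdefault(idx, set()).add(planner)
--     planners = set(grouped.keys())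
--     shared = {
--         idx
--         for idx, solved in success_per_maze.items()
--         if solved == planners and per_maze.get(idx) == planners
--     }
--     return shared
-- ===== SOURCE B (Python) =====
-- def _solved_set(rows):
--     solved = set()
--     for row in rows:
--         idx = row["maze_index"]
--         if row["success"]:
--             solved.add(idx)
--     return solved
--
--
-- def _shared_success_indices(grouped: dict[str, list[dict]]) -> set[int]:
--     """Maze indices solved successfully by ALL planners."""
--     if not grouped:
--         return set()
--     sets = [_solved_set(rows) for rows in grouped.values()]
--     shared = sets[0]
--     for s in sets[1:]:
--         shared = shared & s
--     return shared
-- ===== Notes on version B (the rewrite author's own statement) =====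
-- stated objective: simpler
-- what changed: B replaces A's two per-maze-index planner-set dicts and the compare-each-to-the-full-planner-set comprehension by one solved-index set per planner followed by a plain set intersection.
import Mathlib
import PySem

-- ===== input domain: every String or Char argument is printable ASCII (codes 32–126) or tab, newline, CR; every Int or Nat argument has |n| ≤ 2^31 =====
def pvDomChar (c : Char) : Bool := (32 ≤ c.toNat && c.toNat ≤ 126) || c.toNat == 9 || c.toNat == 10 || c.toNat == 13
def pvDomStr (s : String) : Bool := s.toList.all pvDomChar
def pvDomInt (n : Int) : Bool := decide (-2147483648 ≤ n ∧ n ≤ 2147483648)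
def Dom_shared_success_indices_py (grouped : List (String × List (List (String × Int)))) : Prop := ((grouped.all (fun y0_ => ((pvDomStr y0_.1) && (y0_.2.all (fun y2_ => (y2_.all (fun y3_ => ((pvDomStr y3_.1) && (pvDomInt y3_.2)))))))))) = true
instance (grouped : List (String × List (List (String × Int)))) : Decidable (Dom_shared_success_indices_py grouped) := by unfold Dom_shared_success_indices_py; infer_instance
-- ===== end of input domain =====

-- B replaces A's two per-maze-index planner-set dicts and the compare-to-the-full-planner-set
-- comprehension by one solved-index set per planner followed by a plain set intersection (objective: simpler).

-- ===== PORT A =====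
-- Literal port of A. 'grouped' and each 'row' model Python dicts (PySem.Dict.ofList collapses
-- duplicate keys exactly like dict construction). Python's row["maze_index"]/row["success"] raise
-- KeyError on a missing key; Pre_ excludes exactly those inputs, so the port may read them with
-- getD (the default is never reached inside Pre_).
def shared_success_indices_py (grouped : List (String × List (List (String × Int)))) : List Int :=
  let g := PySem.Dict.ofList grouped
  let st := g.items.foldl
    (fun (st : PySem.Dict Int (PySem.Set String) × PySem.Dict Int (PySem.Set String)) pr =>
      pr.2.foldl
        (fun st row =>
          let idx := (PySem.Dict.ofList row).getD "maze_index" 0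
          let per := st.1.modify idx PySem.Set.empty (fun s => PySem.Set.add s pr.1)
          let suc := if (PySem.Dict.ofList row).getD "success" 0 ≠ 0
                     then st.2.modify idx PySem.Set.empty (fun s => PySem.Set.add s pr.1)
                     else st.2
          (per, suc))
        st)
    (PySem.Dict.empty, PySem.Dict.empty)
  let planners := PySem.Set.ofList g.keys
  st.2.items.foldl
    (fun (acc : PySem.Set Int) p =>
      if (PySem.Set.equal p.2 planners
          && (match st.1.get? p.1 with
              | some s => PySem.Set.equal s planners
              | none => false)) = true
      then PySem.Set.add acc p.1 else acc)
    PySem.Set.empty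

-- ===== PORT B =====
-- helper of B: the set of maze indices a planner's rows solved successfully
def pvSolvedSet (rows : List (List (String × Int))) : PySem.Set Int :=
  rows.foldl
    (fun solved row =>
      let idx := (PySem.Dict.ofList row).getD "maze_index" 0
      if (PySem.Dict.ofList row).getD "success" 0 ≠ 0
      then PySem.Set.add solved idx else solved)
    PySem.Set.empty

def shared_success_indices_py_alt (grouped : List (String × List (List (String × Int)))) : List Int :=
  match (PySem.Dict.ofList grouped).values.map pvSolvedSet with
  | [] => []                                  -- 'if not grouped: return set()'
  | s0 :: rest => rest.foldl (fun shared s => PySem.Set.inter shared s) s0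

-- ===== PRECONDITION & SPEC =====
-- Pre_ excludes exactly the inputs on which Python A raises KeyError: some row of the (duplicate-key
-- collapsed) dict lacks the key "maze_index" or the key "success".
def Pre_shared_success_indices_py (grouped : List (String × List (List (String × Int)))) : Prop :=
  ∀ pr ∈ (PySem.Dict.ofList grouped).items, ∀ row ∈ pr.2,
    "maze_index" ∈ row.map Prod.fst ∧ "success" ∈ row.map Prod.fst
instance (grouped : List (String × List (List (String × Int)))) : Decidable (Pre_shared_success_indices_py grouped) := by unfold Pre_shared_success_indices_py; infer_instance

def pvWitness_shared_success_indices_py : (List (String × List (List (String × Int)))) :=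
  [("astar", [[("maze_index", 0), ("success", 1)], [("maze_index", 1), ("success", 0)]]),
   ("rrt", [[("maze_index", 0), ("success", 1)]])]

def Spec_shared_success_indices_py (grouped : List (String × List (List (String × Int)))) (out : List Int) : Prop := out = shared_success_indices_py_alt grouped
instance (grouped : List (String × List (List (String × Int)))) (out : List Int) : Decidable (Spec_shared_success_indices_py grouped out) := by unfold Spec_shared_success_indices_py; infer_instance

-- ===== CLAIM (what is proved, stated in full; the proofs are below) =====
def Claim_equal_shared_success_indices_py : Prop := ∀ (grouped : List (String × List (List (String × Int)))), Dom_shared_success_indices_py grouped → Pre_shared_success_indices_py grouped → Spec_shared_success_indices_py grouped (shared_success_indices_py grouped)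

-- ===== LEMMAS AND PROOFS =====

-- row accessors, exactly as the ports compute them
def pvIdx (row : List (String × Int)) : Int := (PySem.Dict.ofList row).getD "maze_index" 0
def pvSuc (row : List (String × Int)) : Bool := decide ((PySem.Dict.ofList row).getD "success" 0 ≠ 0)
-- maze indices a planner's rows solved (row order) / mentioned at all
def pvSuccIdxs (rows : List (List (String × Int))) : List Int := (rows.filter pvSuc).map pvIdx
def pvOccIdxs (rows : List (List (String × Int))) : List Int := rows.map pvIdx

-- A's loop state, split into its two dict components
def pvSucDict (items : List (String × List (List (String × Int)))) (d : PySem.Dict Int (PySem.Set String)) : PySem.Dict Int (PySem.Set String) :=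
  items.foldl (fun d pr => pr.2.foldl
    (fun d row => if pvSuc row = true then d.modify (pvIdx row) PySem.Set.empty (fun s => PySem.Set.add s pr.1) else d) d) d
def pvPerDict (items : List (String × List (List (String × Int)))) (d : PySem.Dict Int (PySem.Set String)) : PySem.Dict Int (PySem.Set String) :=
  items.foldl (fun d pr => pr.2.foldl
    (fun d row => d.modify (pvIdx row) PySem.Set.empty (fun s => PySem.Set.add s pr.1)) d) d

theorem pv_keys_modify (d : PySem.Dict Int (PySem.Set String)) (k : Int) (f : PySem.Set String → PySem.Set String) :
    (d.modify k PySem.Set.empty f).keys = PySem.Set.add d.keys k := by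
  rw [PySem.Dict.keys_modify]
  by_cases h : d.contains k = true
  · rw [PySem.Dict.keys_insert_of_contains (h := h),
      PySem.Set.add_of_mem ((PySem.Dict.contains_iff_mem_keys d k).mp h)]
  · rw [PySem.Dict.keys_insert_of_not_contains (h := by simpa using h),
      PySem.Set.add_of_not_mem (fun hm => h ((PySem.Dict.contains_iff_mem_keys d k).mpr hm))]

theorem pv_sucfold_getD (p : String) (rows : List (List (String × Int))) (d : PySem.Dict Int (PySem.Set String)) (k : Int) :
    (rows.foldl (fun d row => if pvSuc row = true then d.modify (pvIdx row) PySem.Set.empty (fun s => PySem.Set.add s p) else d) d).getD k PySem.Set.empty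
    = if k ∈ pvSuccIdxs rows then PySem.Set.add (d.getD k PySem.Set.empty) p else d.getD k PySem.Set.empty := by
  induction rows generalizing d with
  | nil => simp [pvSuccIdxs]
  | cons row rows ih =>
    simp only [List.foldl_cons]
    by_cases hs : pvSuc row = true
    · rw [if_pos hs, ih]
      have hl : pvSuccIdxs (row :: rows) = pvIdx row :: pvSuccIdxs rows := by
        simp [pvSuccIdxs, List.filter_cons, hs]
      rw [hl, PySem.Dict.getD_modify]
      by_cases hk : k ∈ pvSuccIdxs rows
      · rw [if_pos hk, if_pos (List.mem_cons_of_mem _ hk)]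
        by_cases he : k = pvIdx row
        · rw [if_pos he, he]
          exact PySem.Set.add_of_mem ((PySem.Set.mem_add _ _ _).mpr (Or.inr rfl))
        · rw [if_neg he]
      · rw [if_neg hk]
        by_cases he : k = pvIdx row
        · rw [if_pos he, if_pos (by simp [he]), he]
        · rw [if_neg he, if_neg (by simp [he, hk])]
    · rw [if_neg hs, ih]
      have hl : pvSuccIdxs (row :: rows) = pvSuccIdxs rows := by
        simp [pvSuccIdxs, List.filter_cons, hs]
      rw [hl]

theorem pv_sucfold_keys (p : String) (rows : List (List (String × Int))) (d : PySem.Dict Int (PySem.Set String)) :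
    (rows.foldl (fun d row => if pvSuc row = true then d.modify (pvIdx row) PySem.Set.empty (fun s => PySem.Set.add s p) else d) d).keys
    = PySem.Set.update d.keys (pvSuccIdxs rows) := by
  induction rows generalizing d with
  | nil => simp [pvSuccIdxs, PySem.Set.update]
  | cons row rows ih =>
    simp only [List.foldl_cons]
    by_cases hs : pvSuc row = true
    · rw [if_pos hs, ih, pv_keys_modify,
        show pvSuccIdxs (row :: rows) = pvIdx row :: pvSuccIdxs rows by simp [pvSuccIdxs, List.filter_cons, hs],
        PySem.Set.update_cons]
    · rw [if_neg hs, ih,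
        show pvSuccIdxs (row :: rows) = pvSuccIdxs rows by simp [pvSuccIdxs, hs]]

theorem pv_perfold_getD (p : String) (rows : List (List (String × Int))) (d : PySem.Dict Int (PySem.Set String)) (k : Int) :
    (rows.foldl (fun d row => d.modify (pvIdx row) PySem.Set.empty (fun s => PySem.Set.add s p)) d).getD k PySem.Set.empty
    = if k ∈ pvOccIdxs rows then PySem.Set.add (d.getD k PySem.Set.empty) p else d.getD k PySem.Set.empty := by
  induction rows generalizing d with
  | nil => simp [pvOccIdxs]
  | cons row rows ih =>
    simp only [List.foldl_cons]
    rw [ih, show pvOccIdxs (row :: rows) = pvIdx row :: pvOccIdxs rows from rfl,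
      PySem.Dict.getD_modify]
    by_cases hk : k ∈ pvOccIdxs rows
    · rw [if_pos hk, if_pos (List.mem_cons_of_mem _ hk)]
      by_cases he : k = pvIdx row
      · rw [if_pos he, he]
        exact PySem.Set.add_of_mem ((PySem.Set.mem_add _ _ _).mpr (Or.inr rfl))
      · rw [if_neg he]
    · rw [if_neg hk]
      by_cases he : k = pvIdx row
      · rw [if_pos he, if_pos (by simp [he]), he]
      · rw [if_neg he, if_neg (by simp [he, hk])]

theorem pv_perfold_keys (p : String) (rows : List (List (String × Int))) (d : PySem.Dict Int (PySem.Set String)) :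
    (rows.foldl (fun d row => d.modify (pvIdx row) PySem.Set.empty (fun s => PySem.Set.add s p)) d).keys
    = PySem.Set.update d.keys (pvOccIdxs rows) := by
  induction rows generalizing d with
  | nil => simp [pvOccIdxs, PySem.Set.update]
  | cons row rows ih =>
    simp only [List.foldl_cons]
    rw [ih, pv_keys_modify, show pvOccIdxs (row :: rows) = pvIdx row :: pvOccIdxs rows from rfl,
      PySem.Set.update_cons]

theorem pv_sucdict_getD_gen (items : List (String × List (List (String × Int)))) (d : PySem.Dict Int (PySem.Set String)) (k : Int) :
    (pvSucDict items d).getD k PySem.Set.empty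
    = PySem.Set.update (d.getD k PySem.Set.empty) ((items.filter (fun pr => decide (k ∈ pvSuccIdxs pr.2))).map Prod.fst) := by
  induction items generalizing d with
  | nil => simp [pvSucDict, PySem.Set.update]
  | cons pr items ih =>
    show (pvSucDict items _).getD k PySem.Set.empty = _
    rw [ih, pv_sucfold_getD, List.filter_cons]
    by_cases hk : k ∈ pvSuccIdxs pr.2
    · rw [if_pos hk, if_pos (by simpa using hk)]
      rw [List.map_cons, PySem.Set.update_cons]
    · rw [if_neg hk, if_neg (by simpa using hk)]

theorem pv_sucdict_keys_gen (items : List (String × List (List (String × Int)))) (d : PySem.Dict Int (PySem.Set String)) :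
    (pvSucDict items d).keys = PySem.Set.update d.keys (items.flatMap (fun pr => pvSuccIdxs pr.2)) := by
  induction items generalizing d with
  | nil => simp [pvSucDict, PySem.Set.update]
  | cons pr items ih =>
    show (pvSucDict items _).keys = _
    rw [ih, pv_sucfold_keys, List.flatMap_cons, PySem.Set.update_append]

theorem pv_perdict_getD_gen (items : List (String × List (List (String × Int)))) (d : PySem.Dict Int (PySem.Set String)) (k : Int) :
    (pvPerDict items d).getD k PySem.Set.empty
    = PySem.Set.update (d.getD k PySem.Set.empty) ((items.filter (fun pr => decide (k ∈ pvOccIdxs pr.2))).map Prod.fst) := by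
  induction items generalizing d with
  | nil => simp [pvPerDict, PySem.Set.update]
  | cons pr items ih =>
    show (pvPerDict items _).getD k PySem.Set.empty = _
    rw [ih, pv_perfold_getD, List.filter_cons]
    by_cases hk : k ∈ pvOccIdxs pr.2
    · rw [if_pos hk, if_pos (by simpa using hk)]
      rw [List.map_cons, PySem.Set.update_cons]
    · rw [if_neg hk, if_neg (by simpa using hk)]

theorem pv_perdict_keys_gen (items : List (String × List (List (String × Int)))) (d : PySem.Dict Int (PySem.Set String)) :
    (pvPerDict items d).keys = PySem.Set.update d.keys (items.flatMap (fun pr => pvOccIdxs pr.2)) := by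
  induction items generalizing d with
  | nil => simp [pvPerDict, PySem.Set.update]
  | cons pr items ih =>
    show (pvPerDict items _).keys = _
    rw [ih, pv_perfold_keys, List.flatMap_cons, PySem.Set.update_append]

theorem pv_foldl_add_if (p : Int → Bool) (l : List Int) (acc : PySem.Set Int) :
    l.foldl (fun acc x => if p x = true then PySem.Set.add acc x else acc) acc = PySem.Set.update acc (l.filter p) := by
  induction l generalizing acc with
  | nil => simp [PySem.Set.update]
  | cons x l ih =>
    simp only [List.foldl_cons]
    rw [List.filter_cons]
    by_cases hx : p x = true
    · rw [if_pos hx, if_pos hx, ih, PySem.Set.update_cons]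
    · rw [if_neg hx, if_neg hx, ih]

theorem pv_foldl_inter (ts : List (PySem.Set Int)) (s : PySem.Set Int) :
    ts.foldl (fun shared t => PySem.Set.inter shared t) s = s.filter (fun x => decide (∀ t ∈ ts, x ∈ t)) := by
  induction ts generalizing s with
  | nil => simp
  | cons t ts ih =>
    simp only [List.foldl_cons]
    rw [ih, show PySem.Set.inter s t = s.filter (fun x => PySem.Set.contains t x) from rfl,
      List.filter_filter]
    apply List.filter_congr
    intro x _
    by_cases hx : x ∈ t
    · simp [hx, PySem.Set.contains_iff]
    · simp [hx]

theorem pv_equal_iff (items : List (String × List (List (String × Int)))) (hnd : (items.map Prod.fst).Nodup)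
    (p : (String × List (List (String × Int))) → Bool) :
    (PySem.Set.equal (PySem.Set.ofList ((items.filter p).map Prod.fst)) (PySem.Set.ofList (items.map Prod.fst)) = true)
    ↔ ∀ pr ∈ items, p pr = true := by
  rw [PySem.Set.equal_iff]
  constructor
  · intro h pr hpr
    have hx : pr.1 ∈ PySem.Set.ofList (items.map Prod.fst) := by
      rw [PySem.Set.mem_ofList]
      exact List.mem_map_of_mem hpr
    have := (h pr.1).mpr hx
    rw [PySem.Set.mem_ofList, List.mem_map] at this
    obtain ⟨pr', hpr', he⟩ := this
    rw [List.mem_filter] at hpr'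
    have : pr' = pr := List.inj_on_of_nodup_map hnd hpr'.1 hpr he
    rw [← this]
    exact hpr'.2
  · intro h x
    rw [PySem.Set.mem_ofList, PySem.Set.mem_ofList, List.mem_map, List.mem_map]
    constructor
    · rintro ⟨pr, hpr, he⟩
      exact ⟨pr, (List.mem_filter.mp hpr).1, he⟩
    · rintro ⟨pr, hpr, he⟩
      exact ⟨pr, List.mem_filter.mpr ⟨hpr, h pr hpr⟩, he⟩

theorem pv_solvedSet_gen (rows : List (List (String × Int))) (s : PySem.Set Int) :
    rows.foldl
      (fun solved row =>
        let idx := (PySem.Dict.ofList row).getD "maze_index" 0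
        if (PySem.Dict.ofList row).getD "success" 0 ≠ 0
        then PySem.Set.add solved idx else solved) s
    = PySem.Set.update s (pvSuccIdxs rows) := by
  induction rows generalizing s with
  | nil => simp [pvSuccIdxs, PySem.Set.update]
  | cons row rows ih =>
    simp only [List.foldl_cons]
    by_cases hs : pvSuc row = true
    · rw [if_pos (by simpa [pvSuc] using hs), ih,
        show pvSuccIdxs (row :: rows) = pvIdx row :: pvSuccIdxs rows by simp [pvSuccIdxs, List.filter_cons, hs],
        PySem.Set.update_cons]
      rfl
    · rw [if_neg (by simpa [pvSuc] using hs), ih,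
        show pvSuccIdxs (row :: rows) = pvSuccIdxs rows by simp [pvSuccIdxs, hs]]

theorem pv_solvedSet_eq (rows : List (List (String × Int))) :
    pvSolvedSet rows = PySem.Set.ofList (pvSuccIdxs rows) := by
  rw [pvSolvedSet, pv_solvedSet_gen]
  exact PySem.Set.update_nil_left _

theorem pv_foldl_pair {α β γ : Type} (l : List γ) (f1 : α → γ → α) (f2 : β → γ → β) (a : α) (b : β) :
    l.foldl (fun st x => (f1 st.1 x, f2 st.2 x)) (a, b) = (l.foldl f1 a, l.foldl f2 b) := by
  induction l generalizing a b with
  | nil => rfl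
  | cons x l ih => exact ih (f1 a x) (f2 b x)

theorem pv_if_suc {α : Sort _} (row : List (String × Int)) (x y : α) :
    (if (PySem.Dict.ofList row).getD "success" 0 ≠ 0 then x else y) = (if pvSuc row = true then x else y) := by
  by_cases h : (PySem.Dict.ofList row).getD "success" 0 ≠ 0
  · rw [if_pos h, if_pos (by simp [pvSuc, h])]
  · rw [if_neg h, if_neg (by simp [pvSuc, h])]

theorem pvA_state (items : List (String × List (List (String × Int)))) :
    items.foldl
      (fun (st : PySem.Dict Int (PySem.Set String) × PySem.Dict Int (PySem.Set String)) pr =>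
        pr.2.foldl
          (fun st row =>
            let idx := (PySem.Dict.ofList row).getD "maze_index" 0
            let per := st.1.modify idx PySem.Set.empty (fun s => PySem.Set.add s pr.1)
            let suc := if (PySem.Dict.ofList row).getD "success" 0 ≠ 0
                       then st.2.modify idx PySem.Set.empty (fun s => PySem.Set.add s pr.1)
                       else st.2
            (per, suc))
          st)
      (PySem.Dict.empty, PySem.Dict.empty)
    = (pvPerDict items PySem.Dict.empty, pvSucDict items PySem.Dict.empty) := by
  suffices h : ∀ (a b : PySem.Dict Int (PySem.Set String)),
      items.foldl
        (fun (st : PySem.Dict Int (PySem.Set String) × PySem.Dict Int (PySem.Set String)) pr =>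
          pr.2.foldl
            (fun st row =>
              let idx := (PySem.Dict.ofList row).getD "maze_index" 0
              let per := st.1.modify idx PySem.Set.empty (fun s => PySem.Set.add s pr.1)
              let suc := if (PySem.Dict.ofList row).getD "success" 0 ≠ 0
                         then st.2.modify idx PySem.Set.empty (fun s => PySem.Set.add s pr.1)
                         else st.2
              (per, suc))
            st)
        (a, b)
      = (pvPerDict items a, pvSucDict items b) from h _ _
  induction items with
  | nil => intro a b; rfl
  | cons pr items ih =>
    intro a b
    simp only [List.foldl_cons]
    have hin : pr.2.foldl
        (fun (st : PySem.Dict Int (PySem.Set String) × PySem.Dict Int (PySem.Set String)) row =>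
          let idx := (PySem.Dict.ofList row).getD "maze_index" 0
          let per := st.1.modify idx PySem.Set.empty (fun s => PySem.Set.add s pr.1)
          let suc := if (PySem.Dict.ofList row).getD "success" 0 ≠ 0
                     then st.2.modify idx PySem.Set.empty (fun s => PySem.Set.add s pr.1)
                     else st.2
          (per, suc))
        (a, b)
        = (pr.2.foldl (fun d row => d.modify (pvIdx row) PySem.Set.empty (fun s => PySem.Set.add s pr.1)) a,
           pr.2.foldl (fun d row => if pvSuc row = true then d.modify (pvIdx row) PySem.Set.empty (fun s => PySem.Set.add s pr.1) else d) b) := by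
      refine (PySem.List.foldl_congr_mem pr.2 _
        (fun (st : PySem.Dict Int (PySem.Set String) × PySem.Dict Int (PySem.Set String)) row =>
          (st.1.modify (pvIdx row) PySem.Set.empty (fun s => PySem.Set.add s pr.1),
           if pvSuc row = true then st.2.modify (pvIdx row) PySem.Set.empty (fun s => PySem.Set.add s pr.1) else st.2))
        (a, b) ?_).trans (pv_foldl_pair pr.2
          (fun d row => d.modify (pvIdx row) PySem.Set.empty (fun s => PySem.Set.add s pr.1))
          (fun d row => if pvSuc row = true then d.modify (pvIdx row) PySem.Set.empty (fun s => PySem.Set.add s pr.1) else d)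
          a b)
      intro st row _
      show (_, if (PySem.Dict.ofList row).getD "success" 0 ≠ 0 then _ else _) = _
      rw [pv_if_suc]
      rfl
    rw [hin, ih]
    rfl

theorem pv_succ_sub_occ {k : Int} {rows : List (List (String × Int))} (h : k ∈ pvSuccIdxs rows) :
    k ∈ pvOccIdxs rows := by
  rw [pvSuccIdxs] at h
  rw [pvOccIdxs]
  obtain ⟨row, hrow, he⟩ := List.mem_map.mp h
  exact List.mem_map.mpr ⟨row, (List.mem_filter.mp hrow).1, he⟩

theorem pv_sucdict_getD (items : List (String × List (List (String × Int)))) (k : Int) :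
    (pvSucDict items PySem.Dict.empty).getD k PySem.Set.empty
    = PySem.Set.ofList ((items.filter (fun pr => decide (k ∈ pvSuccIdxs pr.2))).map Prod.fst) := by
  rw [pv_sucdict_getD_gen, PySem.Dict.getD_empty]
  exact PySem.Set.update_nil_left _

theorem pv_perdict_getD (items : List (String × List (List (String × Int)))) (k : Int) :
    (pvPerDict items PySem.Dict.empty).getD k PySem.Set.empty
    = PySem.Set.ofList ((items.filter (fun pr => decide (k ∈ pvOccIdxs pr.2))).map Prod.fst) := by
  rw [pv_perdict_getD_gen, PySem.Dict.getD_empty]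
  exact PySem.Set.update_nil_left _

theorem pv_sucdict_keys (items : List (String × List (List (String × Int)))) :
    (pvSucDict items PySem.Dict.empty).keys = PySem.Set.ofList (items.flatMap (fun pr => pvSuccIdxs pr.2)) := by
  rw [pv_sucdict_keys_gen, PySem.Dict.keys_empty]
  exact PySem.Set.update_nil_left _

theorem pv_perdict_keys (items : List (String × List (List (String × Int)))) :
    (pvPerDict items PySem.Dict.empty).keys = PySem.Set.ofList (items.flatMap (fun pr => pvOccIdxs pr.2)) := by
  rw [pv_perdict_keys_gen, PySem.Dict.keys_empty]
  exact PySem.Set.update_nil_left _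

theorem pv_cond_eq (items : List (String × List (List (String × Int))))
    (hnd : (items.map Prod.fst).Nodup) (k : Int)
    (hk : k ∈ items.flatMap (fun pr => pvSuccIdxs pr.2)) :
    (PySem.Set.equal ((pvSucDict items PySem.Dict.empty).getD k PySem.Set.empty) (PySem.Set.ofList (items.map Prod.fst))
      && (match (pvPerDict items PySem.Dict.empty).get? k with
          | some s => PySem.Set.equal s (PySem.Set.ofList (items.map Prod.fst))
          | none => false))
    = decide (∀ pr ∈ items, k ∈ pvSuccIdxs pr.2) := by
  have hocc : k ∈ (pvPerDict items PySem.Dict.empty).keys := by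
    rw [pv_perdict_keys, PySem.Set.mem_ofList]
    obtain ⟨pr, hpr, hks⟩ := List.mem_flatMap.mp hk
    exact List.mem_flatMap.mpr ⟨pr, hpr, pv_succ_sub_occ hks⟩
  cases hg : (pvPerDict items PySem.Dict.empty).get? k with
  | none => exact absurd ((PySem.Dict.get?_eq_none_iff_not_mem_keys _ _).mp hg) (not_not_intro hocc)
  | some s =>
    have hs : s = (pvPerDict items PySem.Dict.empty).getD k PySem.Set.empty := by
      rw [PySem.Dict.getD_eq_get?_getD, hg]; rfl
    rw [hs, pv_perdict_getD, pv_sucdict_getD, Bool.eq_iff_iff]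
    simp only [Bool.and_eq_true, pv_equal_iff _ hnd, decide_eq_true_eq]
    constructor
    · rintro ⟨h1, _⟩
      exact h1
    · intro h
      exact ⟨h, fun pr hpr => pv_succ_sub_occ (h pr hpr)⟩

theorem pv_main_items (items : List (String × List (List (String × Int))))
    (hnd : (items.map Prod.fst).Nodup) :
    ((items.foldl
      (fun (st : PySem.Dict Int (PySem.Set String) × PySem.Dict Int (PySem.Set String)) pr =>
        pr.2.foldl
          (fun st row =>
            let idx := (PySem.Dict.ofList row).getD "maze_index" 0
            let per := st.1.modify idx PySem.Set.empty (fun s => PySem.Set.add s pr.1)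
            let suc := if (PySem.Dict.ofList row).getD "success" 0 ≠ 0
                       then st.2.modify idx PySem.Set.empty (fun s => PySem.Set.add s pr.1)
                       else st.2
            (per, suc))
          st)
      (PySem.Dict.empty, PySem.Dict.empty)).2.items.foldl
      (fun (acc : PySem.Set Int) p =>
        if (PySem.Set.equal p.2 (PySem.Set.ofList (items.map Prod.fst))
            && (match (items.foldl
                  (fun (st : PySem.Dict Int (PySem.Set String) × PySem.Dict Int (PySem.Set String)) pr =>
                    pr.2.foldl
                      (fun st row =>
                        let idx := (PySem.Dict.ofList row).getD "maze_index" 0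
                        let per := st.1.modify idx PySem.Set.empty (fun s => PySem.Set.add s pr.1)
                        let suc := if (PySem.Dict.ofList row).getD "success" 0 ≠ 0
                                   then st.2.modify idx PySem.Set.empty (fun s => PySem.Set.add s pr.1)
                                   else st.2
                        (per, suc))
                      st)
                  (PySem.Dict.empty, PySem.Dict.empty)).1.get? p.1 with
                | some s => PySem.Set.equal s (PySem.Set.ofList (items.map Prod.fst))
                | none => false)) = true
        then PySem.Set.add acc p.1 else acc)
      PySem.Set.empty)
    = (match (items.map (fun pr => pr.2)).map pvSolvedSet with
       | [] => []
       | s0 :: rest => rest.foldl (fun shared s => PySem.Set.inter shared s) s0) := by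
  rw [pvA_state]
  dsimp only
  have hkeys := pv_sucdict_keys items
  have hnodup : (pvSucDict items PySem.Dict.empty).keys.Nodup := by
    rw [hkeys]; exact PySem.Set.nodup_ofList _
  rw [PySem.Dict.items_eq_map_keys _ hnodup PySem.Set.empty, List.foldl_map, hkeys]
  rw [show (PySem.Set.empty : PySem.Set Int) = ([] : List Int) from rfl]
  rw [pv_foldl_add_if, PySem.Set.update_nil_left,
    PySem.Set.ofList_eq_self_of_nodup _ (List.Nodup.filter _ (PySem.Set.nodup_ofList _)),
    List.filter_congr (fun k hk => pv_cond_eq items hnd k ((PySem.Set.mem_ofList _ _).mp hk))]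
  cases items with
  | nil => rfl
  | cons pr0 rest =>
    simp only [List.map_cons, List.map_map, List.flatMap_cons]
    rw [pv_solvedSet_eq, pv_foldl_inter, PySem.Set.ofList_append,
      PySem.Set.update_eq_append_filter, List.filter_append]
    have hnil : ((PySem.Set.ofList (rest.flatMap (fun pr => pvSuccIdxs pr.2))).filter
        (fun y => !(PySem.Set.ofList (pvSuccIdxs pr0.2)).contains y)).filter
        (fun k => decide (∀ pr ∈ pr0 :: rest, k ∈ pvSuccIdxs pr.2)) = [] := by
      rw [List.filter_eq_nil_iff]
      intro k hk2
      have hns : k ∉ PySem.Set.ofList (pvSuccIdxs pr0.2) := by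
        have := (List.mem_filter.mp hk2).2
        simp only [Bool.not_eq_eq_eq_not, Bool.not_true] at this
        intro hmem
        rw [(PySem.Set.contains_iff _ _).mpr hmem] at this
        exact Bool.true_eq_false.mp this
      simp only [decide_eq_true_eq, List.forall_mem_cons, not_and]
      intro h0 _
      exact hns ((PySem.Set.mem_ofList _ _).mpr h0)
    rw [hnil, List.append_nil]
    apply List.filter_congr
    intro k hk
    have hk0 : k ∈ pvSuccIdxs pr0.2 := (PySem.Set.mem_ofList _ _).mp hk
    simp only [decide_eq_decide, List.forall_mem_cons, List.forall_mem_map,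
      Function.comp, pv_solvedSet_eq, PySem.Set.mem_ofList]
    exact ⟨fun h => h.2, fun h => ⟨hk0, h⟩⟩

theorem pv_main (grouped : List (String × List (List (String × Int)))) :
    shared_success_indices_py grouped = shared_success_indices_py_alt grouped := by
  have hnd : ((PySem.Dict.ofList grouped).items.map Prod.fst).Nodup :=
    PySem.Dict.nodup_keys_ofList grouped
  exact pv_main_items (PySem.Dict.ofList grouped).items hnd

-- ===== VERDICT (by name: the statement is the Claim_ definition above) =====
theorem shared_success_indices_py_spec : Claim_equal_shared_success_indices_py := by
  intro grouped _ _
  unfold Spec_shared_success_indices_py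
  exact pv_main grouped
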